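-- pv_equiv track=rewrite | github.com/zhijing-jin/pytorch-GraphWriter | try_dataset.py | get_ent_phrases
-- ===== SOURCE A (Python) =====
-- def get_ent_phrases(ent_lens, ents): \
--         # [batch,] for ent start idx
--     ent_st = [[sum(doc_ent_lens[:i])
--                for i in range(len(doc_ent_lens))]
--               for doc_ent_lens in ent_lens
--               ]
--
--     # word_enc for packed_doc [batch, n_word, dim]
--     ent_phrases = [[doc_ents[st:st + lens]
--                     for st, lens in zip(doc_ent_st, doc_ent_lens)]
--                    for doc_ent_st, doc_ent_lens, doc_ents in
--                    zip(ent_st, ent_lens, ents)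
--                    ]
--     return ent_phrases
-- ===== SOURCE B (Python) =====
-- def get_ent_phrases(ent_lens, ents):
--     # one pass per doc: keep a running start offset instead of re-summing prefixes
--     out = []
--     for doc_lens, doc_ents in zip(ent_lens, ents):
--         doc = []
--         st = 0
--         for ln in doc_lens:
--             doc.append(doc_ents[st:st + ln])
--             st += ln
--         out.append(doc)
--     return out
-- ===== Notes on version B (the rewrite author's own statement) =====
-- stated objective: faster
-- what changed: replaces the quadratic recomputation of each start offset via sum(doc_ent_lens[:i]) by a single running prefix-sum accumulator while slicing in the same pass
import Mathlib
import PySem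

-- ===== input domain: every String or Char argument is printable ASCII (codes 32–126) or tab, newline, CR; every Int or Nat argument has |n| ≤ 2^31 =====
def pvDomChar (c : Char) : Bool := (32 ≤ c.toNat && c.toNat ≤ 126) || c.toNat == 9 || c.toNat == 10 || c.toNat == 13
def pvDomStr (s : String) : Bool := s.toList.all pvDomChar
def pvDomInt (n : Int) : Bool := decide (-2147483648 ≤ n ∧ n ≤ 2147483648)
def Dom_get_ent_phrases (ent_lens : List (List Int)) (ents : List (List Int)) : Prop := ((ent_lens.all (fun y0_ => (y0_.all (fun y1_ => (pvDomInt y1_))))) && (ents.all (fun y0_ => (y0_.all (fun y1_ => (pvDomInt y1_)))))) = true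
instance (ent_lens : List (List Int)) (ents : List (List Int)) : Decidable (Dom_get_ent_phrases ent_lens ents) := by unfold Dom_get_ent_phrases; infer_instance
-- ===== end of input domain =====

-- B replaces A's quadratic per-doc recomputation of start offsets (sum of a prefix slice
-- for every index) by a single running prefix-sum accumulator; return values are identical.

-- ===== PORT A =====
def get_ent_phrases (ent_lens : List (List Int)) (ents : List (List Int)) : List (List (List Int)) :=
  let ent_st : List (List Int) := ent_lens.map (fun doc_ent_lens =>
    (List.range doc_ent_lens.length).map
      (fun (i : Nat) => (PySem.List.slice doc_ent_lens none (some (i : Int))).sum))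
  ((ent_st.zip ent_lens).zip ents).map (fun p =>
    (p.1.1.zip p.1.2).map (fun q => PySem.List.slice p.2 (some q.1) (some (q.1 + q.2))))

-- ===== PORT B =====
-- inner loop of Source B: running start offset `st`, one slice per length
def altDoc (doc_ents : List Int) : List Int → Int → List (List Int)
  | [], _ => []
  | ln :: rest, st => PySem.List.slice doc_ents (some st) (some (st + ln)) :: altDoc doc_ents rest (st + ln)

def get_ent_phrases_alt (ent_lens : List (List Int)) (ents : List (List Int)) : List (List (List Int)) :=
  (ent_lens.zip ents).map (fun p => altDoc p.2 p.1 0)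

-- ===== PRECONDITION & SPEC =====
def Spec_get_ent_phrases (ent_lens : List (List Int)) (ents : List (List Int)) (out : List (List (List Int))) : Prop := out = get_ent_phrases_alt ent_lens ents
instance (ent_lens : List (List Int)) (ents : List (List Int)) (out : List (List (List Int))) : Decidable (Spec_get_ent_phrases ent_lens ents out) := by unfold Spec_get_ent_phrases; infer_instance

-- ===== CLAIM (what is proved, stated in full; the proofs are below) =====
def Claim_equal_get_ent_phrases : Prop := ∀ (ent_lens : List (List Int)) (ents : List (List Int)), Dom_get_ent_phrases ent_lens ents → Spec_get_ent_phrases ent_lens ents (get_ent_phrases ent_lens ents)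

-- ===== LEMMAS AND PROOFS =====

-- B's running-offset loop computes exactly the (shifted) prefix-sum starts zipped with the lengths.
theorem altDoc_eq (de : List Int) : ∀ (ds : List Int) (s : Int),
    altDoc de ds s =
      (((List.range ds.length).map (fun i => s + ((ds.take i).sum))).zip ds).map
        (fun q => PySem.List.slice de (some q.1) (some (q.1 + q.2)))
  | [], _ => rfl
  | d :: ds, s => by
    simp [altDoc, List.range_succ_eq_map, List.map_map, Function.comp_def,
      altDoc_eq de ds (s + d), add_assoc]

-- A's per-doc comprehension (slice-sum starts, then zip-and-slice) equals B's loop from offset 0.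
theorem docA_eq (de ds : List Int) :
    (((List.range ds.length).map (fun (i : Nat) => (PySem.List.slice ds none (some (i : Int))).sum)).zip ds).map
      (fun q => PySem.List.slice de (some q.1) (some (q.1 + q.2))) = altDoc de ds 0 := by
  have h : (fun (i : Nat) => (PySem.List.slice ds none (some (i : Int))).sum)
      = fun i : ℕ => (0 : Int) + ((ds.take i).sum) := by
    funext i; simp [PySem.List.slice_to_natCast]
  rw [altDoc_eq, ← h]

theorem main_eq (ent_lens ents : List (List Int)) :
    get_ent_phrases ent_lens ents = get_ent_phrases_alt ent_lens ents := by
  induction ent_lens generalizing ents with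
  | nil => cases ents <;> rfl
  | cons d ds ih =>
    cases ents with
    | nil => rfl
    | cons e es =>
      have ih' := ih es
      simp only [get_ent_phrases, get_ent_phrases_alt, List.map_cons, List.zip_cons_cons] at ih' ⊢
      simp only [List.cons.injEq]
      exact ⟨docA_eq e d, ih'⟩

-- ===== VERDICT (by name: the statement is the Claim_ definition above) =====
theorem get_ent_phrases_spec : Claim_equal_get_ent_phrases := by
  intro ent_lens ents _
  exact main_eq ent_lens ents
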